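-- pv_equiv track=rewrite | github.com/pipeduque/descomposition-cut-algorithms | descomposition.py | getIndicesToMargenalice
-- ===== SOURCE A (Python) =====
-- def getIndicesToMargenalice(states, state):
--     availableIndices = []
--     indices = {}
--     csValue = ""
--
--     for i in range(len(state)):
--         if state[i] != None:
--             availableIndices.append(i)
--             csValue = str(state[i]) + csValue
--
--     for i in range(len(states)):
--         key = ""
--         for j in range(len(availableIndices)):
--             key += str(states[i][availableIndices[j]])
--
--         indices[key] = indices.get(key) + [i] if indices.get(key) else [i]
--
--     if csValue == "":
--         return indices, 0
--
--     return indices, int(csValue, 2)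
-- ===== SOURCE B (Python) =====
-- def getIndicesToMargenalice(states, state):
--     avail = [i for i, v in enumerate(state) if v is not None]
--     vals = [v for v in state if v is not None]
--     keys = ["".join(str(row[a]) for a in avail) for row in states]
--     indices = {k: [i for i, kk in enumerate(keys) if kk == k] for k in dict.fromkeys(keys)}
--     bits = "".join(str(v) for v in reversed(vals))
--     return indices, int(bits, 2) if bits else 0
-- ===== Notes on version B (the rewrite author's own statement) =====
-- stated objective: alternative
-- what changed: B computes the per-state key list once with join over a comprehension, groups by ordered dedup of that list with a per-key scan (dict.fromkeys + comprehensions) instead of A's incremental dict get/update loop, and builds the bit-string from the kept values in one reversed join instead of A's character-by-character prepending.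
import Mathlib
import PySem

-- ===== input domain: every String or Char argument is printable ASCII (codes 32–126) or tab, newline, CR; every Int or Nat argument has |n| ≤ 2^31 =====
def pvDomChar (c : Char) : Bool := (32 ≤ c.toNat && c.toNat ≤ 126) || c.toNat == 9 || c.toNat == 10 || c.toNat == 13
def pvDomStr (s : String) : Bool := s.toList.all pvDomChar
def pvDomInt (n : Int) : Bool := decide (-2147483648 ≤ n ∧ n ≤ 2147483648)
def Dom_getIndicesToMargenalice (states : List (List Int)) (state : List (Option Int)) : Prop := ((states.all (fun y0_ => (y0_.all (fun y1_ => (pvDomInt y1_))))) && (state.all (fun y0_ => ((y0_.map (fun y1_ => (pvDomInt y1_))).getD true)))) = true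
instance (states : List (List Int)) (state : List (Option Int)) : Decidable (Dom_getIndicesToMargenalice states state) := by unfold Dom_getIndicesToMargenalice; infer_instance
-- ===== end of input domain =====

-- B groups the state indices by a key list computed once (ordered dedup + per-key scans) and derives the
-- marginalized value from the kept values directly, instead of A's incremental dict rebuilding and
-- character-by-character string accumulation; objective: alternative (not measured faster).

-- ===== PORT A =====
-- strings are accumulated as List Char (PySem.Chars side) and wrapped with String.ofList at the dict key,
-- as PYSEM.md prescribes; int(csValue, 2) is PySem.Int.ofCharsBase? (none = ValueError, excluded by Pre_).
def getIndicesToMargenalice (states : List (List Int)) (state : List (Option Int)) : (List (String × List Int)) × Int :=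
  let p := (PySem.List.pyRange 0 (PySem.List.len state) 1).foldl
    (fun (p : List Int × List Char) i =>
      match PySem.List.pyGetD state i none with
      | some v => (p.1 ++ [i], PySem.Int.toChars v ++ p.2)
      | none => p)
    ([], [])
  let availableIndices := p.1
  let csValue := p.2
  let indices := (PySem.List.pyRange 0 (PySem.List.len states) 1).foldl
    (fun (d : PySem.Dict String (List Int)) i =>
      let key := String.ofList ((PySem.List.pyRange 0 (PySem.List.len availableIndices) 1).foldl
        (fun (k : List Char) j =>
          k ++ PySem.Int.toChars (PySem.List.pyGetD (PySem.List.pyGetD states i [])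
                                    (PySem.List.pyGetD availableIndices j 0) 0)) [])
      d.insert key (match d.get? key with
        | some l => if l ≠ [] then l ++ [i] else [i]
        | none => [i]))
    PySem.Dict.empty
  if csValue = [] then (indices.items, 0)
  else (indices.items, (PySem.Int.ofCharsBase? csValue 2).getD 0)

-- ===== PORT B =====
def getIndicesToMargenalice_alt (states : List (List Int)) (state : List (Option Int)) : (List (String × List Int)) × Int :=
  let avail : List Int := ((PySem.List.enumerate state).filter (fun p => p.2.isSome)).map (fun p => p.1)
  let vals : List Int := state.filterMap id
  let keys : List String := states.map (fun row =>
    String.ofList (PySem.Chars.join [] (avail.map (fun a => PySem.Int.toChars (PySem.List.pyGetD row a 0)))))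
  let indices : List (String × List Int) := (PySem.List.dedup keys).map (fun k =>
    (k, ((PySem.List.enumerate keys).filter (fun p => p.2 == k)).map (fun p => p.1)))
  let bits : List Char := PySem.Chars.join [] (vals.reverse.map (fun v => PySem.Int.toChars v))
  (indices, if bits ≠ [] then (PySem.Int.ofCharsBase? bits 2).getD 0 else 0)

-- ===== PRECONDITION & SPEC =====
-- Pre_ excludes exactly the inputs where A raises: IndexError when some row of states is shorter than a
-- marginalized (non-None) index of state, and ValueError when the concatenated bit-string is not a valid
-- base-2 literal (a value with a decimal digit other than 0/1, or a negative value before the last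
-- marginalized position).
def Pre_getIndicesToMargenalice (states : List (List Int)) (state : List (Option Int)) : Prop :=
  ∀ i : Nat, (hi : i < state.length) → ∀ v ∈ state[i],
    ((PySem.Int.toChars (v.natAbs : Int)).all (fun c => c == '0' || c == '1') = true ∧
     (∀ row ∈ states, i < row.length) ∧
     (v < 0 → ∀ j : Nat, (hj : j < state.length) → i < j → state[j] = none))
instance (states : List (List Int)) (state : List (Option Int)) : Decidable (Pre_getIndicesToMargenalice states state) := by unfold Pre_getIndicesToMargenalice; infer_instance

def pvWitness_getIndicesToMargenalice : List (List Int) × List (Option Int) :=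
  ([[0, 1], [1, 1]], [some 1, none])

def Spec_getIndicesToMargenalice (states : List (List Int)) (state : List (Option Int)) (out : (List (String × List Int)) × Int) : Prop := out = getIndicesToMargenalice_alt states state
instance (states : List (List Int)) (state : List (Option Int)) (out : (List (String × List Int)) × Int) : Decidable (Spec_getIndicesToMargenalice states state out) := by unfold Spec_getIndicesToMargenalice; infer_instance

-- ===== CLAIM (what is proved, stated in full; the proofs are below) =====
def Claim_equal_getIndicesToMargenalice : Prop := ∀ (states : List (List Int)) (state : List (Option Int)), Dom_getIndicesToMargenalice states state → Pre_getIndicesToMargenalice states state → Spec_getIndicesToMargenalice states state (getIndicesToMargenalice states state)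

-- ===== LEMMAS AND PROOFS =====

-- "".join(chunks) is the concatenation of the chunks
theorem pvJoinNil (l : List (List Char)) : PySem.Chars.join [] l = l.flatten := by
  simp [PySem.Chars.join, List.intercalate]
  induction l with
  | nil => rfl
  | cons a t ih =>
    cases t with
    | nil => simp
    | cons b t' => simpa [List.intersperse] using ih

-- accumulating 'k += g a' over a list is the flattened map
theorem pvChunks {α : Type} (g : α → List Char) :
    ∀ (l : List α) (acc : List Char),
      l.foldl (fun k a => k ++ g a) acc = acc ++ (l.map g).flatten := by
  intro l
  induction l with
  | nil => simp
  | cons a t ih => intro acc; simp [ih, List.append_assoc]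

-- A's first loop computes (B's avail, B's bits)
theorem pvLoop1 :
    ∀ (xs : List (Option Int)) (s : Int) (A0 : List Int) (C0 : List Char),
      (PySem.List.enumerate xs s).foldl
        (fun (p : List Int × List Char) q =>
          match q.2 with
          | some v => (p.1 ++ [q.1], PySem.Int.toChars v ++ p.2)
          | none => p) (A0, C0)
      = (A0 ++ ((PySem.List.enumerate xs s).filter (fun p => p.2.isSome)).map (fun p => p.1),
         ((xs.filterMap id).map PySem.Int.toChars).reverse.flatten ++ C0) := by
  intro xs
  induction xs with
  | nil => intro s A0 C0; simp [PySem.List.enumerate_nil]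
  | cons x t ih =>
    intro s A0 C0
    cases x with
    | none => simp [PySem.List.enumerate_cons, ih]
    | some v => simp [PySem.List.enumerate_cons, ih, List.append_assoc]

-- enumerate of a mapped list
theorem pvEnumMap {α β : Type} (f : α → β) :
    ∀ (l : List α) (s : Int),
      PySem.List.enumerate (l.map f) s = (PySem.List.enumerate l s).map (fun p => (p.1, f p.2)) := by
  intro l
  induction l with
  | nil => intro s; simp [PySem.List.enumerate_nil]
  | cons a t ih => intro s; simp [PySem.List.enumerate_cons, ih]

-- A's dict update is 'd[key] = d.get(key, []) + [i]'
theorem pvStepEq :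
    (fun (d : PySem.Dict String (List Int)) (q : Int × String) =>
        d.insert q.2 (match d.get? q.2 with
          | some l => if l ≠ [] then l ++ [q.1] else [q.1]
          | none => [q.1]))
    = (fun (d : PySem.Dict String (List Int)) (q : Int × String) =>
        d.modify q.2 [] (fun l => l ++ [q.1])) := by
  funext d q
  show d.insert q.2 _ = d.insert q.2 (d.getD q.2 [] ++ [q.1])
  congr 1
  rcases h : d.get? q.2 with _ | l
  · simp [PySem.Dict.getD_eq_get?_getD, h]
  · rcases l with _ | ⟨a, l'⟩ <;> simp [PySem.Dict.getD_eq_get?_getD, h]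

-- items of A's incrementally built dict = B's dedup-and-scan grouping
theorem pvDictItems (ks : List String) :
    ((PySem.List.enumerate ks).foldl
      (fun (d : PySem.Dict String (List Int)) q =>
        d.insert q.2 (match d.get? q.2 with
          | some l => if l ≠ [] then l ++ [q.1] else [q.1]
          | none => [q.1])) PySem.Dict.empty).items
    = (PySem.List.dedup ks).map (fun k =>
        (k, ((PySem.List.enumerate ks).filter (fun p => p.2 == k)).map (fun p => p.1))) := by
  rw [pvStepEq]
  have hkeys : (((PySem.List.enumerate ks).foldl (fun d q => d.modify q.2 [] (fun l => l ++ [q.1])) PySem.Dict.empty).keys)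
      = PySem.List.dedup ks := by
    have := PySem.Dict.keys_foldl_modify_key (PySem.List.enumerate ks) (fun q : Int × String => q.2) []
      (fun _ q => (fun l => l ++ [q.1])) PySem.Dict.empty
    simpa [PySem.Set.update_nil_left, PySem.List.map_snd_enumerate ks 0] using this
  have hnd : (((PySem.List.enumerate ks).foldl (fun d q => d.modify q.2 [] (fun l => l ++ [q.1])) PySem.Dict.empty).keys).Nodup := by
    exact PySem.Dict.nodup_keys_foldl_modify_key (PySem.List.enumerate ks) (fun q : Int × String => q.2) []
      (fun _ q => (fun l => l ++ [q.1])) PySem.Dict.empty (by simp)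
  rw [PySem.Dict.items_eq_map_keys _ hnd [], hkeys]
  refine List.map_congr_left ?_
  intro k _
  congr 1
  have hswap : (PySem.List.enumerate ks).foldl (fun d q => d.modify q.2 [] (fun l => l ++ [q.1])) PySem.Dict.empty
      = ((PySem.List.enumerate ks).map Prod.swap).foldl
          (fun (d : PySem.Dict String (List Int)) p => d.modify p.1 [] (fun l => l ++ [p.2]))
          PySem.Dict.empty := by
    rw [List.foldl_map]
    rfl
  rw [hswap, PySem.Dict.getD_foldl_modify_append]
  simp [List.filter_map, List.map_map, Function.comp_def, Prod.swap]

-- the two ports agree on every input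
theorem pvMain (states : List (List Int)) (state : List (Option Int)) :
    getIndicesToMargenalice states state = getIndicesToMargenalice_alt states state := by
  have hloop :
      (PySem.List.pyRange 0 (PySem.List.len state) 1).foldl
        (fun (p : List Int × List Char) i =>
          match PySem.List.pyGetD state i none with
          | some v => (p.1 ++ [i], PySem.Int.toChars v ++ p.2)
          | none => p) ([], [])
      = (((PySem.List.enumerate state).filter (fun p => p.2.isSome)).map (fun p => p.1),
         ((state.filterMap id).map PySem.Int.toChars).reverse.flatten) := by
    have h := pvLoop1 state 0 [] []
    simp only [List.nil_append, List.append_nil] at h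
    conv at h => lhs; rw [PySem.List.enumerate_eq_map_pyRange state none, List.foldl_map]
    exact h
  set avail : List Int :=
    ((PySem.List.enumerate state).filter (fun p => p.2.isSome)).map (fun p => p.1) with havail
  set bits : List Char := ((state.filterMap id).map PySem.Int.toChars).reverse.flatten with hbits
  have hkey : ∀ row : List Int,
      (PySem.List.pyRange 0 (PySem.List.len avail) 1).foldl
        (fun (k : List Char) j =>
          k ++ PySem.Int.toChars (PySem.List.pyGetD row (PySem.List.pyGetD avail j 0) 0)) []
      = PySem.Chars.join [] (avail.map (fun a => PySem.Int.toChars (PySem.List.pyGetD row a 0))) := by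
    intro row
    rw [pvJoinNil,
      PySem.List.foldl_pyRange_zero_pyGetD avail 0
        (fun (k : List Char) a => k ++ PySem.Int.toChars (PySem.List.pyGetD row a 0)) [],
      pvChunks]
    simp
  have hdict :
      (PySem.List.pyRange 0 (PySem.List.len states) 1).foldl
        (fun (d : PySem.Dict String (List Int)) i =>
          d.insert (String.ofList ((PySem.List.pyRange 0 (PySem.List.len avail) 1).foldl
              (fun (k : List Char) j =>
                k ++ PySem.Int.toChars (PySem.List.pyGetD (PySem.List.pyGetD states i [])
                  (PySem.List.pyGetD avail j 0) 0)) []))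
            (match d.get? (String.ofList ((PySem.List.pyRange 0 (PySem.List.len avail) 1).foldl
              (fun (k : List Char) j =>
                k ++ PySem.Int.toChars (PySem.List.pyGetD (PySem.List.pyGetD states i [])
                  (PySem.List.pyGetD avail j 0) 0)) [])) with
              | some l => if l ≠ [] then l ++ [i] else [i]
              | none => [i])) PySem.Dict.empty
      = (PySem.List.enumerate (states.map (fun row =>
            String.ofList (PySem.Chars.join []
              (avail.map (fun a => PySem.Int.toChars (PySem.List.pyGetD row a 0))))))).foldl
          (fun (d : PySem.Dict String (List Int)) q =>
            d.insert q.2 (match d.get? q.2 with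
              | some l => if l ≠ [] then l ++ [q.1] else [q.1]
              | none => [q.1])) PySem.Dict.empty := by
    rw [pvEnumMap (fun row =>
          String.ofList (PySem.Chars.join []
            (avail.map (fun a => PySem.Int.toChars (PySem.List.pyGetD row a 0))))) states 0,
      List.foldl_map,
      PySem.List.enumerate_eq_map_pyRange states ([] : List Int), List.foldl_map]
    simp only [hkey]
  have hbits2 : PySem.Chars.join [] ((state.filterMap id).reverse.map (fun v => PySem.Int.toChars v)) = bits := by
    rw [pvJoinNil, List.map_reverse]
  unfold getIndicesToMargenalice getIndicesToMargenalice_alt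
  simp only [hloop, hdict, pvDictItems, hbits2]
  by_cases hb : bits = [] <;> simp only [hb, ne_eq, not_true_eq_false, not_false_eq_true,
    if_true, if_false] <;> rw [← havail]

-- ===== VERDICT (by name: the statement is the Claim_ definition above) =====
theorem getIndicesToMargenalice_spec : Claim_equal_getIndicesToMargenalice := by
  intro states state _ _
  unfold Spec_getIndicesToMargenalice
  exact pvMain states state
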